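-- pv_equiv track=rewrite | github.com/alexandraback/datacollection | solutions_1483488_0/Python/tolui/recycle.py | is_recicled
-- ===== SOURCE A (Python) =====
-- def is_recicled(n,m):
--     n_str = str(n)
--     lenght =len(n_str)
--     for i in range(1,len(n_str)):
--         sample = n_str[lenght-i:]+n_str[:lenght-i]
--         val = int(sample)
--         if(val == m):
--             #print (n,m)
--             return True
--     return False
-- ===== SOURCE B (Python) =====
-- def is_recicled(n, m):
--     L = len(str(n))
--     p = 10 ** (L - 1)
--     cur = n
--     for _ in range(L - 1):
--         cur = (cur % 10) * p + cur // 10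
--         if cur == m:
--             return True
--     return False
-- ===== Notes on version B (the rewrite author's own statement) =====
-- stated objective: alternative
-- what changed: B rotates the number arithmetically (cur = cur%10 * 10**(L-1) + cur//10), keeping a running integer, instead of re-slicing the decimal string and re-parsing each rotation with int().
import Mathlib
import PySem

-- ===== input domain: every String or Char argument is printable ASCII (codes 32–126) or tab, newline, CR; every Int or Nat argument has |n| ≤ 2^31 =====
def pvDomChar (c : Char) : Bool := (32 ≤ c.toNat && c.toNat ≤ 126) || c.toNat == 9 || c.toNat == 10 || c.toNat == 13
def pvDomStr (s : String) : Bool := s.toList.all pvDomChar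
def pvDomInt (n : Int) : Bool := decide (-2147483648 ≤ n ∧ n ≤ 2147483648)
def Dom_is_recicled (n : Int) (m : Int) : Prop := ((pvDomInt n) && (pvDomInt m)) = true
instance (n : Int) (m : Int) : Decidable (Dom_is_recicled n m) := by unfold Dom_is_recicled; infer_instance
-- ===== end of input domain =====

-- B replaces per-rotation string slicing + int() re-parsing by an arithmetic rotation of a
-- running integer (alternative decomposition; no speed claim).

-- ===== PORT A =====
-- Transliteration of A's loop over i in range(1, len(n_str)).  int(sample) is
-- PySem.Int.ofChars?: `none` = ValueError (reachable only for n < 0, excluded by Pre_);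
-- the top-level `.getD false` is likewise only reachable outside Pre_is_recicled.
def isRecLoopA (n_str : List Char) (lenght : Int) (m : Int) : List Int → Option Bool
  | [] => some false
  | i :: rest =>
    let sample := PySem.List.slice n_str (some (lenght - i)) none ++
      PySem.List.slice n_str none (some (lenght - i))
    match PySem.Int.ofChars? sample with
    | none => none
    | some val => if val == m then some true else isRecLoopA n_str lenght m rest

def is_recicled (n : Int) (m : Int) : Bool :=
  let n_str := PySem.Int.toChars n
  let lenght := PySem.List.len n_str
  (isRecLoopA n_str lenght m (PySem.List.pyRange 1 lenght 1)).getD false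

-- ===== PORT B =====
-- Transliteration of B: `for _ in range(L-1)` is Nat fuel; cur is rotated arithmetically.
def altLoopB (p m : Int) (cur : Int) : Nat → Bool
  | 0 => false
  | Nat.succ k =>
    let cur' := PySem.Int.mod cur 10 * p + PySem.Int.floordiv cur 10
    if cur' == m then true else altLoopB p m cur' k

def is_recicled_alt (n : Int) (m : Int) : Bool :=
  let L : Nat := (PySem.Int.toChars n).length
  let p : Int := (10 : Int) ^ (L - 1)
  altLoopB p m n (L - 1)

-- ===== PRECONDITION & SPEC =====
-- Pre_ excludes exactly the inputs where A raises: for n < 0 Python's int() raises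
-- ValueError on the first rotated string (the '-' ends up mid-string).
def Pre_is_recicled (n : Int) (m : Int) : Prop := 0 ≤ n
instance (n : Int) (m : Int) : Decidable (Pre_is_recicled n m) := by unfold Pre_is_recicled; infer_instance
def pvWitness_is_recicled : Int × Int := (102, 210)

def Spec_is_recicled (n : Int) (m : Int) (out : Bool) : Prop := out = is_recicled_alt n m
instance (n : Int) (m : Int) (out : Bool) : Decidable (Spec_is_recicled n m out) := by unfold Spec_is_recicled; infer_instance

-- ===== CLAIM (what is proved, stated in full; the proofs are below) =====
def Claim_equal_is_recicled : Prop := ∀ (n : Int) (m : Int), Dom_is_recicled n m → Pre_is_recicled n m → Spec_is_recicled n m (is_recicled n m)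
-- ===== LEMMAS AND PROOFS =====

-- decimal value of a digit string, as A's int() computes it on all-digit input
def pvStep (a : Nat) (c : Char) : Nat := a * 10 + (c.toNat - '0'.toNat)
def pvVal (cs : List Char) : Nat := cs.foldl pvStep 0
-- right rotation of the digit string by k: s[L-k:] + s[:L-k]
def rotC (s : List Char) (k : Nat) : List Char :=
  s.drop (s.length - k) ++ s.take (s.length - k)

-- the shape of PySem.Int.ofChars?, with its (private) digit-scanning loop abstracted out
def pvShape (g : List Char → Bool → Nat → Option Nat) : List Char → Option Int :=
  fun s =>
    match (List.dropWhile PySem.Int.isIntSpace (List.dropWhile PySem.Int.isIntSpace s).reverse).reverse with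
    | '-' :: ds => Option.map (fun n => -n) (do let a ← (match ds with | [] => none | cs => g cs false 0); pure ((a : Nat) : Int))
    | '+' :: ds => Option.map (fun n => n) (do let a ← (match ds with | [] => none | cs => g cs false 0); pure ((a : Nat) : Int))
    | ds => Option.map (fun n => n) (do let a ← (match ds with | [] => none | cs => g cs false 0); pure ((a : Nat) : Int))

-- captures ofChars?'s internal scanner g together with its defining equations (all by rfl)
theorem pvCap : ∃ g : List Char → Bool → Nat → Option Nat,
    PySem.Int.ofChars? = pvShape g ∧
    (∀ b acc, g [] b acc = if b = true then some acc else none) ∧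
    (∀ c rest b acc, g (c :: rest) b acc =
      if c.isDigit = true then g rest true (acc * 10 + (c.toNat - '0'.toNat))
      else if c = '_' ∧ b = true then
        (match rest with
         | d :: _ => if d.isDigit = true then g rest false acc else none
         | [] => none)
      else none) :=
  ⟨_, rfl, fun _ _ => rfl, fun _ _ _ _ => rfl⟩

theorem pv_digit_bounds (c : Char) (h : c.isDigit = true) : 48 ≤ c.toNat ∧ c.toNat ≤ 57 := by
  simp [Char.isDigit] at h
  exact ⟨UInt32.le_iff_toNat_le.mp h.1, UInt32.le_iff_toNat_le.mp h.2⟩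

theorem pv_digit_not_space (c : Char) (h : c.isDigit = true) : PySem.Int.isIntSpace c = false := by
  obtain ⟨h1, h2⟩ := pv_digit_bounds c h
  simp only [PySem.Int.isIntSpace, Bool.or_eq_false_iff, decide_eq_false_iff_not]
  and_intros <;> rintro rfl <;> revert h1 h2 <;> decide

theorem pv_dropWhile_id (l : List Char) (h : ∀ c ∈ l, PySem.Int.isIntSpace c = false) :
    List.dropWhile PySem.Int.isIntSpace l = l := by
  cases l with
  | nil => rfl
  | cons c t => simp [h c (by simp)]

theorem pvVal_acc : ∀ (t : List Char) (acc : Nat), t.foldl pvStep acc = acc * 10 ^ t.length + pvVal t := by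
  intro t
  induction t with
  | nil => intro acc; simp [pvVal]
  | cons c t ih =>
    intro acc
    have h1 : pvVal (c :: t) = (pvStep 0 c) * 10 ^ t.length + pvVal t := by
      simp only [pvVal, List.foldl_cons]
      exact ih _
    simp only [List.foldl_cons, List.length_cons, ih, h1, pvStep]
    ring

theorem pvParse (ds : List Char) (hd : ∀ c ∈ ds, c.isDigit = true) (hne : ds ≠ []) :
    PySem.Int.ofChars? ds = some ((pvVal ds : Nat) : Int) := by
  obtain ⟨g, hof, hnil, hcons⟩ := pvCap
  have gtrue : ∀ (t : List Char) (acc : Nat), (∀ c ∈ t, c.isDigit = true) →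
      g t true acc = some (t.foldl pvStep acc) := by
    intro t
    induction t with
    | nil => intro acc _; simp [hnil]
    | cons c t ih =>
      intro acc hall
      rw [hcons, if_pos (hall c (by simp))]
      rw [ih _ (fun x hx => hall x (by simp [hx]))]
      simp [pvStep]
  obtain ⟨c, t, rfl⟩ : ∃ c t, ds = c :: t := by
    cases ds with
    | nil => exact absurd rfl hne
    | cons c t => exact ⟨c, t, rfl⟩
  have hsp : ∀ x ∈ c :: t, PySem.Int.isIntSpace x = false := fun x hx => pv_digit_not_space x (hd x hx)
  have hrev : ∀ x ∈ (c :: t).reverse, PySem.Int.isIntSpace x = false :=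
    fun x hx => hsp x (List.mem_reverse.mp hx)
  have hcd := hd c (by simp)
  obtain ⟨hb1, hb2⟩ := pv_digit_bounds c hcd
  rw [hof]
  show pvShape g (c :: t) = _
  unfold pvShape
  rw [pv_dropWhile_id _ hsp, pv_dropWhile_id _ hrev, List.reverse_reverse]
  split
  · next ds' heq =>
    exfalso
    have : c = '-' := by injection heq
    subst this
    revert hb1; decide
  · next ds' heq =>
    exfalso
    have : c = '+' := by injection heq
    subst this
    revert hb1; decide
  · have hred : (match (c :: t : List Char) with | [] => none | cs => g cs false 0) = g (c :: t) false 0 := rfl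
    rw [hred, hcons, if_pos hcd, gtrue t _ (fun x hx => hd x (by simp [hx]))]
    simp [pvVal, pvStep]

theorem pv_digitChar_val (k : Nat) (hk : k < 10) : (Nat.digitChar k).toNat - 48 = k := by
  interval_cases k <;> decide

theorem pvVal_toDigits : ∀ v : Nat, pvVal (Nat.toDigits 10 v) = v := by
  intro v
  induction v using Nat.strong_induction_on with
  | _ v ih =>
    rw [Nat.toDigits_eq_if (by norm_num)]
    by_cases hv : v < 10
    · rw [if_pos hv]
      simp [pvVal, pvStep]
      exact pv_digitChar_val v hv
    · rw [if_neg hv]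
      have hlt : v / 10 < v := Nat.div_lt_self (by omega) (by norm_num)
      have hih := ih _ hlt
      have hstep : pvVal (Nat.toDigits 10 (v / 10) ++ [(v % 10).digitChar]) =
          pvStep (pvVal (Nat.toDigits 10 (v / 10))) ((v % 10).digitChar) := by
        simp [pvVal, List.foldl_append]
      have hz : '0'.toNat = 48 := by decide
      have hd10 := pv_digitChar_val (v % 10) (by omega)
      rw [hstep, hih]
      simp only [pvStep, hz]
      omega

theorem pv_toDigits_digits (v : Nat) : ∀ c ∈ Nat.toDigits 10 v, c.isDigit = true :=
  fun _ hc => Nat.isDigit_of_mem_toDigits (by norm_num) (le_refl 10) hc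

theorem rot_zero (s : List Char) : rotC s 0 = s := by simp [rotC]

theorem rot_len (s : List Char) (k : Nat) : (rotC s k).length = s.length := by
  rw [rotC, List.length_append, List.length_drop, List.length_take]; omega

theorem rot_mem (s : List Char) (k : Nat) (c : Char) (hc : c ∈ rotC s k) : c ∈ s := by
  rcases List.mem_append.mp hc with h | h
  · exact List.drop_subset _ _ h
  · exact List.take_subset _ _ h

theorem rot_succ (s : List Char) (k : Nat) (hk : k < s.length) :
    ∃ u cch, rotC s k = u ++ [cch] ∧ rotC s (k + 1) = cch :: u ∧
      u.length = s.length - 1 ∧ cch ∈ s := by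
  have hp : s.length - k - 1 < s.length := by omega
  have h1 : s.length - k = (s.length - k - 1) + 1 := by omega
  refine ⟨s.drop (s.length - k) ++ s.take (s.length - k - 1), s[s.length - k - 1], ?_, ?_, ?_, List.getElem_mem _⟩
  · have htake : s.take (s.length - k) = s.take (s.length - k - 1) ++ [s[s.length - k - 1]] := by
      conv_lhs => rw [h1]
      rw [List.take_add_one, List.getElem?_eq_getElem hp]
      simp
    rw [rotC, htake]
    simp [List.append_assoc]
  · have h2 : s.length - (k + 1) = s.length - k - 1 := by omega
    rw [rotC, h2, List.drop_eq_getElem_cons hp,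
      show s.length - k - 1 + 1 = s.length - k from by omega]
    simp
  · simp only [List.length_append, List.length_drop, List.length_take]
    omega

theorem pv_arith_step (u : List Char) (c : Char) (hc : c.isDigit = true) :
    PySem.Int.mod ((pvVal (u ++ [c]) : Nat) : Int) 10 * (10 : Int) ^ u.length +
      PySem.Int.floordiv ((pvVal (u ++ [c]) : Nat) : Int) 10 = ((pvVal (c :: u) : Nat) : Int) := by
  obtain ⟨hb1, hb2⟩ := pv_digit_bounds c hc
  have hz : '0'.toNat = 48 := by decide
  have hval : pvVal (u ++ [c]) = pvVal u * 10 + (c.toNat - '0'.toNat) := by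
    simp [pvVal, List.foldl_append, pvStep]
  have hcons : pvVal (c :: u) = (c.toNat - '0'.toNat) * 10 ^ u.length + pvVal u := by
    have h := pvVal_acc u (pvStep 0 c)
    simp only [pvVal, List.foldl_cons]
    rw [h]
    simp [pvStep, pvVal]
  have hmod : pvVal (u ++ [c]) % 10 = c.toNat - '0'.toNat := by
    rw [hz] at hval ⊢; omega
  have hdiv : pvVal (u ++ [c]) / 10 = pvVal u := by
    rw [hz] at hval; omega
  rw [PySem.Int.mod_eq_emod_of_pos (by norm_num), PySem.Int.floordiv_eq_ediv_of_pos (by norm_num)]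
  have e1 : ((pvVal (u ++ [c]) : Nat) : Int) % 10 = ((pvVal (u ++ [c]) % 10 : Nat) : Int) := by omega
  have e2 : ((pvVal (u ++ [c]) : Nat) : Int) / 10 = ((pvVal (u ++ [c]) / 10 : Nat) : Int) := by omega
  rw [e1, e2, hmod, hdiv, hcons]
  push_cast
  ring

theorem pv_loops (s : List Char) (m : Int) (hd : ∀ c ∈ s, c.isDigit = true) (hL : 1 ≤ s.length) :
    ∀ (f k : Nat), k + f = s.length → 1 ≤ k →
      isRecLoopA s (↑s.length) m (PySem.List.pyRange (↑k) (↑s.length) 1) =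
        some (altLoopB ((10 : Int) ^ (s.length - 1)) m ((pvVal (rotC s (k - 1)) : Nat) : Int) f) := by
  intro f
  induction f with
  | zero =>
    intro k hk _
    have hkk : (k : Int) = (s.length : Int) := by omega
    rw [hkk]
    have hnil : PySem.List.pyRange (↑s.length) (↑s.length) 1 = [] := by
      simp [PySem.List.pyRange]
    rw [hnil]
    rfl
  | succ f ih =>
    intro k hk hk1
    have hkL : k < s.length := by omega
    rw [PySem.List.pyRange_one_cons (by exact_mod_cast hkL)]
    have h0 : (0 : Int) ≤ ↑s.length - ↑k := by omega
    have hsl1 : PySem.List.slice s (some (↑s.length - ↑k)) none = s.drop (s.length - k) := by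
      rw [PySem.List.slice_from _ h0]; congr 1; omega
    have hsl2 : PySem.List.slice s none (some (↑s.length - ↑k)) = s.take (s.length - k) := by
      rw [PySem.List.slice_to _ h0]; congr 1; omega
    have hr : s.drop (s.length - k) ++ s.take (s.length - k) = rotC s k := rfl
    have hrot_digits : ∀ x ∈ rotC s k, x.isDigit = true := fun x hx => hd x (rot_mem s k x hx)
    have hrotne : rotC s k ≠ [] := by
      have hlen := rot_len s k
      intro hcon
      rw [hcon] at hlen
      simp at hlen
      omega
    have hparse : PySem.Int.ofChars? (rotC s k) = some ((pvVal (rotC s k) : Nat) : Int) :=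
      pvParse _ hrot_digits hrotne
    obtain ⟨u, cch, hu1, hu2, hulen, hcmem⟩ := rot_succ s (k - 1) (by omega)
    rw [show k - 1 + 1 = k from by omega] at hu2
    have harith := pv_arith_step u cch (hd cch hcmem)
    rw [← hu1, ← hu2, hulen] at harith
    simp only [isRecLoopA, altLoopB, hsl1, hsl2, hr, hparse]
    rw [harith]
    cases hm : (((pvVal (rotC s k) : Nat) : Int) == m) with
    | true => simp
    | false =>
      simp only [Bool.false_eq_true, if_false]
      have hnext := ih (k + 1) (by omega) (by omega)
      rw [show k + 1 - 1 = k from by omega] at hnext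
      exact_mod_cast hnext

theorem pv_main (n m : Int) (hpre : 0 ≤ n) : is_recicled n m = is_recicled_alt n m := by
  unfold is_recicled is_recicled_alt
  have hs : PySem.Int.toChars n = Nat.toDigits 10 n.toNat := by
    unfold PySem.Int.toChars
    rw [if_neg (by omega : ¬ n < 0)]
  simp only [hs, PySem.List.len_eq]
  set s := Nat.toDigits 10 n.toNat with hsdef
  have hL : 1 ≤ s.length := Nat.length_toDigits_pos
  have hloop := pv_loops s m (pv_toDigits_digits n.toNat) hL (s.length - 1) 1 (by omega) (le_refl 1)
  simp only [Nat.cast_one] at hloop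
  rw [hloop]
  have hv : ((pvVal (rotC s (1 - 1)) : Nat) : Int) = n := by
    rw [show (1 : Nat) - 1 = 0 from rfl, rot_zero, hsdef, pvVal_toDigits]
    omega
  rw [hv]
  rfl

-- ===== VERDICT (by name: the statement is the Claim_ definition above) =====
theorem is_recicled_spec : Claim_equal_is_recicled := by
  intro n m _ hpre
  unfold Spec_is_recicled
  exact pv_main n m hpre
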